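-- pv_equiv track=rewrite | github.com/psycholinguistics2125/violent_men | src/preprocessing.py | split_interaction_by_questions
-- ===== SOURCE A (Python) =====
-- def split_interaction_by_questions(interaction_list):
--     result_dict = {f"Q{i}": [] for i in range(1, 5)}
--
--     current_keyword = None
--     current_list = None
--
--     for interaction in interaction_list:
--         if interaction["speaker"] == "experimenter":
--             for keyword in ["Q1", "Q2", "Q3", "Q4"]:
--                 if keyword in interaction["text"]:
--                     current_keyword = keyword
--                     current_list = result_dict[keyword]
--                     break
--
--         if current_keyword is not None:
--             current_list.append(interaction)
--         elif current_list is not None: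
--             current_list.append(interaction)
--
--     return result_dict
-- ===== SOURCE B (Python) =====
-- def split_interaction_by_questions(interaction_list):
--     KEYS = ["Q1", "Q2", "Q3", "Q4"]
--     # pass 1: forward-fill the owning keyword for each row
--     labels = []
--     prev = None
--     for row in interaction_list:
--         if row["speaker"] == "experimenter":
--             kw = next((k for k in KEYS if k in row["text"]), None)
--             if kw is not None:
--                 prev = kw
--         labels.append(prev)
--     # pass 2: distribute rows into their buckets
--     result = {k: [] for k in KEYS}
--     for lab, row in zip(labels, interaction_list):
--         if lab is not None:
--             result[lab].append(row)
--     return result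
-- ===== Notes on version B (the rewrite author's own statement) =====
-- stated objective: alternative
-- what changed: B replaces A's one-pass state machine (aliased mutable bucket reference threaded through the loop) by two separated passes: a forward-fill pass that labels every row with its owning keyword, then a distribution pass that appends each labelled row to its bucket.
-- outside the precondition, e.g. on split_interaction_by_questions([{'foo': 'bar'}]): A raises KeyError, B raises KeyError; on split_interaction_by_questions([{'speaker': 'experimenter'}]): A raises KeyError, B raises KeyError
import Mathlib
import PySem

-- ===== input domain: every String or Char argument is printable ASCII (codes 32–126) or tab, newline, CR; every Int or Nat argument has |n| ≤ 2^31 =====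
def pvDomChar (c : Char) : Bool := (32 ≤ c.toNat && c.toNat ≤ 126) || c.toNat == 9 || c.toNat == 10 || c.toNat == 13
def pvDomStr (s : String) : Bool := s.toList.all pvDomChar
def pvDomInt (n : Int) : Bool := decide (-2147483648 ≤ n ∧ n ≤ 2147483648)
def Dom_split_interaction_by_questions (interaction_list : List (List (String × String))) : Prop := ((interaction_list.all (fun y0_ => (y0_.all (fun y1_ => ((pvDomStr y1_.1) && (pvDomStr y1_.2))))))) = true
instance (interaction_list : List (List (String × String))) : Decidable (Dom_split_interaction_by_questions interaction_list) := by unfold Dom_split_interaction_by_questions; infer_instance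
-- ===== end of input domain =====

-- B separates A's single stateful loop into a forward-fill labelling pass followed by a
-- distribution pass (alternative decomposition; same asymptotic cost; return value only).

-- ===== PORT A =====
-- row["k"]: first-match lookup on the association list (Python dict access; none = KeyError)
def pvRowGet (row : List (String × String)) (k : String) : Option String :=
  (PySem.Dict.mk row).get? k

-- inner 'for keyword in [...] … break': first keyword contained in the text
def pvKwScan : List String → String → Option String
  | [], _ => none
  | k :: rest, t => if PySem.Str.isIn k t then some k else pvKwScan rest t

-- one iteration of A's loop; state = (result_dict, current_keyword, current_list-as-its-key)
def pvStepA (st : PySem.Dict String (List (List (String × String))) × Option String × Option String)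
    (row : List (String × String)) :
    PySem.Dict String (List (List (String × String))) × Option String × Option String :=
  let p : Option String × Option String :=
    if pvRowGet row "speaker" == some "experimenter" then
      match pvKwScan ["Q1", "Q2", "Q3", "Q4"] ((pvRowGet row "text").getD "") with
      | some k => (some k, some k)
      | none => (st.2.1, st.2.2)
    else (st.2.1, st.2.2)
  let d : PySem.Dict String (List (List (String × String))) :=
    match p.1 with
    | some k => st.1.modify k [] (· ++ [row])
    | none =>
      match p.2 with
      | some k => st.1.modify k [] (· ++ [row])
      | none => st.1
  (d, p.1, p.2)

def split_interaction_by_questions (interaction_list : List (List (String × String))) : List (String × List (List (String × String))) :=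
  let result_dict : PySem.Dict String (List (List (String × String))) :=
    (PySem.List.pyRange 1 5 1).foldl
      (fun d i => d.insert ("Q" ++ PySem.Int.toStr i) []) PySem.Dict.empty
  (interaction_list.foldl pvStepA (result_dict, none, none)).1.items

-- ===== PORT B =====
-- pass 1: forward-fill the owning keyword of each row
def pvLabels (prev : Option String) : List (List (String × String)) → List (Option String)
  | [] => []
  | row :: rest =>
    let prev' : Option String :=
      if pvRowGet row "speaker" == some "experimenter" then
        match (["Q1", "Q2", "Q3", "Q4"].find? (fun k => PySem.Str.isIn k ((pvRowGet row "text").getD ""))) with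
        | some kw => some kw
        | none => prev
      else prev
    prev' :: pvLabels prev' rest

def split_interaction_by_questions_alt (interaction_list : List (List (String × String))) : List (String × List (List (String × String))) :=
  let keys : List String := ["Q1", "Q2", "Q3", "Q4"]
  let labels := pvLabels none interaction_list
  let result : PySem.Dict String (List (List (String × String))) :=
    keys.foldl (fun d k => d.insert k []) PySem.Dict.empty
  ((labels.zip interaction_list).foldl
      (fun d p =>
        match p.1 with
        | some lab => d.modify lab [] (· ++ [p.2])
        | none => d)
      result).items

-- ===== PRECONDITION & SPEC =====
-- Pre_ excludes rows whose key list has duplicates (a Python dict cannot represent them, so the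
-- assoc-list first-match reading is not A's behaviour there) and rows on which A raises KeyError:
-- a missing "speaker" key, or a missing "text" key on an experimenter row.
def Pre_split_interaction_by_questions (interaction_list : List (List (String × String))) : Prop :=
  ∀ row ∈ interaction_list,
    (row.map Prod.fst).Nodup ∧
    (pvRowGet row "speaker").isSome = true ∧
    (pvRowGet row "speaker" = some "experimenter" → (pvRowGet row "text").isSome = true)
instance (interaction_list : List (List (String × String))) : Decidable (Pre_split_interaction_by_questions interaction_list) := by unfold Pre_split_interaction_by_questions; infer_instance

def pvWitness_split_interaction_by_questions : (List (List (String × String))) :=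
  [[("speaker", "experimenter"), ("text", "Q1 hello")], [("speaker", "participant"), ("text", "yes")]]

def Spec_split_interaction_by_questions (interaction_list : List (List (String × String))) (out : List (String × List (List (String × String)))) : Prop := out = split_interaction_by_questions_alt interaction_list
instance (interaction_list : List (List (String × String))) (out : List (String × List (List (String × String)))) : Decidable (Spec_split_interaction_by_questions interaction_list out) := by unfold Spec_split_interaction_by_questions; infer_instance

-- ===== CLAIM (what is proved, stated in full; the proofs are below) =====
def Claim_equal_split_interaction_by_questions : Prop := ∀ (interaction_list : List (List (String × String))), Dom_split_interaction_by_questions interaction_list → Pre_split_interaction_by_questions interaction_list → Spec_split_interaction_by_questions interaction_list (split_interaction_by_questions interaction_list)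

-- ===== LEMMAS AND PROOFS =====

lemma pvKwScan_eq_find? (ks : List String) (t : String) :
    pvKwScan ks t = ks.find? (fun k => PySem.Str.isIn k t) := by
  induction ks with
  | nil => rfl
  | cons k rest ih =>
    simp only [pvKwScan, List.find?, PySem.Str.isIn_eq] at *
    by_cases h : PySem.Chars.isIn k.toList t.toList = true <;>
      simp [h, ih]

lemma pvMain (rows : List (List (String × String)))
    (c : Option String) (d : PySem.Dict String (List (List (String × String)))) :
    (rows.foldl pvStepA (d, c, c)).1 =
      ((pvLabels c rows).zip rows).foldl
        (fun d p =>
          match p.1 with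
          | some lab => d.modify lab [] (· ++ [p.2])
          | none => d) d := by
  induction rows generalizing c d with
  | nil => rfl
  | cons row rest ih =>
    simp only [List.foldl, pvLabels, List.zip_cons_cons]
    rw [← pvKwScan_eq_find?]
    simp only [pvStepA]
    by_cases hs : (pvRowGet row "speaker" == some "experimenter") = true
    · simp only [hs, if_pos]
      cases hk : pvKwScan ["Q1", "Q2", "Q3", "Q4"] ((pvRowGet row "text").getD "") with
      | some k => simpa using ih (some k) (d.modify k [] (· ++ [row]))
      | none =>
        cases c with
        | some k => simpa using ih (some k) (d.modify k [] (· ++ [row]))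
        | none => simpa using ih none d
    · simp only [hs, if_neg, Bool.not_eq_true]
      cases c with
      | some k => simpa [hs] using ih (some k) (d.modify k [] (· ++ [row]))
      | none => simpa [hs] using ih none d

lemma pvInit_eq :
    ((PySem.List.pyRange 1 5 1).foldl
        (fun (d : PySem.Dict String (List (List (String × String)))) i =>
          d.insert ("Q" ++ PySem.Int.toStr i) []) PySem.Dict.empty) =
      (["Q1", "Q2", "Q3", "Q4"].foldl
        (fun (d : PySem.Dict String (List (List (String × String)))) k => d.insert k []) PySem.Dict.empty) := by
  decide

-- ===== VERDICT (by name: the statement is the Claim_ definition above) =====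
theorem split_interaction_by_questions_spec : Claim_equal_split_interaction_by_questions := by
  intro l _ _
  unfold Spec_split_interaction_by_questions split_interaction_by_questions split_interaction_by_questions_alt
  simp only [pvInit_eq, pvMain]
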